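-- pv_equiv track=rewrite | github.com/yaranasserr/aws | 2025/one/sol.py | optimizeIdentifiers
-- ===== SOURCE A (Python) =====
-- def optimizeIdentifiers(s: str) -> int:
--     answer = 0
--     left, right = 0, 0
--     n = len(s)
--
--     if s[0] == s[-1]:
--         return n - 1
--
--     for index, char in enumerate(s):
--         if char == s[0]:
--             left = index
--
--         if char == s[-1]:
--             right = index
--
--         if right > left:
--             answer = max(answer, n -  (right - left + 1))
--
--     return answer
-- ===== SOURCE B (Python) =====
-- def optimizeIdentifiers(s: str) -> int:
--     n = len(s)
--     if s[0] == s[-1]: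
--         return n - 1
--     first, last = s[0], s[-1]
--     p0 = [i for i, c in enumerate(s) if c == first]
--     p1 = [j for j, c in enumerate(s) if c == last]
--     best = n + 1
--     k = 0
--     left = 0
--     for j in p1:
--         while k < len(p0) and p0[k] < j:
--             left = p0[k]
--             k += 1
--         best = min(best, j - left + 1)
--     return n - best
-- ===== Notes on version B (the rewrite author's own statement) =====
-- stated objective: alternative
-- what changed: A fuses everything into one scan that re-maximizes on every character while tracking last-seen left/right indices; B first builds the two occurrence-index tables (positions of s[0] and of s[-1]) and then merges them with a pointer walk, minimizing the window j-i+1 and returning n minus it.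
import Mathlib
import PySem

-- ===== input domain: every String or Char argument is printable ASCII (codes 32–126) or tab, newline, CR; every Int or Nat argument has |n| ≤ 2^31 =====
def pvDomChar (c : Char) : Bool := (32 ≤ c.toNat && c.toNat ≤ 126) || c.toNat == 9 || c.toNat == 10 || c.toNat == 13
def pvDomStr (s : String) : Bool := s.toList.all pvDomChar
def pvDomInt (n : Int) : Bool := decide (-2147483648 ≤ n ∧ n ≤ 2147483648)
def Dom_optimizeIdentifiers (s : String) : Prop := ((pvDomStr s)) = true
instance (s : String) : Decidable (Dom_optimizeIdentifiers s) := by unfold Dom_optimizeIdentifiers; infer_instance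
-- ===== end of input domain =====

-- B replaces A's fused three-variable scan by building the two occurrence-index tables and
-- walking them with a pointer (objective: alternative decomposition, same O(n) cost).

-- ===== PORT A =====
-- one iteration of A's 'for index, char in enumerate(s)' over the state (answer, left, right)
def stepA (c0 cl : Char) (n : Int) (st : Int × Int × Int) (p : Int × Char) : Int × Int × Int :=
  let left := if p.2 = c0 then p.1 else st.2.1
  let right := if p.2 = cl then p.1 else st.2.2
  let answer := if left < right then max st.1 (n - (right - left + 1)) else st.1
  (answer, left, right)

def optimizeIdentifiers (s : String) : Int :=
  let cs := s.toList
  let n : Int := cs.length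
  match PySem.List.pyGet? cs 0, PySem.List.pyGet? cs (-1) with
  | some c0, some cl =>
      if c0 = cl then n - 1
      else ((PySem.List.enumerate cs 0).foldl (stepA c0 cl n) (0, 0, 0)).1
  | _, _ => 0   -- s[0] on empty s raises IndexError; excluded by Pre_

-- ===== PORT B =====
-- the inner 'while k < len(p0) and p0[k] < j' pointer advance (state: remaining p0 suffix, left)
def advanceB : List Int → Int → Int → (List Int × Int)
  | [], left, _ => ([], left)
  | i :: rest, left, j => if i < j then advanceB rest i j else (i :: rest, left)

-- the outer 'for j in p1' loop of B
def loopB : List Int → List Int → Int → Int → Int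
  | [], _, _, best => best
  | j :: js, p0, left, best =>
      let a := advanceB p0 left j
      loopB js a.1 a.2 (min best (j - a.2 + 1))

def optimizeIdentifiers_alt (s : String) : Int :=
  let cs := s.toList
  let n : Int := cs.length
  match PySem.List.pyGet? cs 0 with
  | none => 0   -- s[0] on empty s raises IndexError; excluded by Pre_
  | some c0 =>
    match PySem.List.pyGet? cs (-1) with
    | none => 0
    | some cl =>
      if c0 = cl then n - 1
      else
        let p0 := ((PySem.List.enumerate cs 0).filter (fun p => p.2 == c0)).map (·.1)
        let p1 := ((PySem.List.enumerate cs 0).filter (fun p => p.2 == cl)).map (·.1)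
        n - loopB p1 p0 0 (n + 1)

-- ===== PRECONDITION & SPEC =====
-- Pre_ excludes only the empty string, on which Python A raises IndexError (s[0]).
def Pre_optimizeIdentifiers (s : String) : Prop := s ≠ ""
instance (s : String) : Decidable (Pre_optimizeIdentifiers s) := by unfold Pre_optimizeIdentifiers; infer_instance
def pvWitness_optimizeIdentifiers : String := "ab"

def Spec_optimizeIdentifiers (s : String) (out : Int) : Prop := out = optimizeIdentifiers_alt s
instance (s : String) (out : Int) : Decidable (Spec_optimizeIdentifiers s out) := by unfold Spec_optimizeIdentifiers; infer_instance

-- ===== CLAIM (what is proved, stated in full; the proofs are below) =====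
def Claim_equal_optimizeIdentifiers : Prop := ∀ (s : String), Dom_optimizeIdentifiers s → Pre_optimizeIdentifiers s → Spec_optimizeIdentifiers s (optimizeIdentifiers s)

-- ===== LEMMAS AND PROOFS =====

-- nearest p0 left j = last element of p0 below j, default left (the value B's pointer tracks)
def nearest (p0 : List Int) (left j : Int) : Int :=
  (p0.filter (fun i => decide (i < j))).getLastD left

-- reference recursion: A's scan keyed on the character cases instead of the left/right compare
def refGo (c0 cl : Char) (n : Int) : List (Int × Char) → Int → Int → Int
  | [], ans, _ => ans
  | (i, c) :: rest, ans, left =>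
      let left' := if c = c0 then i else left
      let ans' := if c = cl then max ans (n - (i - left' + 1)) else ans
      refGo c0 cl n rest ans' left'

-- the same recursion, tracking the minimal window instead of the answer
def wgo (c0 cl : Char) : List (Int × Char) → Int → Int → Int
  | [], _, b => b
  | (i, c) :: rest, left, b =>
      let left' := if c = c0 then i else left
      let b' := if c = cl then min b (i - left' + 1) else b
      wgo c0 cl rest left' b'

lemma getLastD_append (xs ys : List Int) (d : Int) :
    (xs ++ ys).getLastD d = ys.getLastD (xs.getLastD d) := by
  induction xs generalizing d with
  | nil => rfl
  | cons x xs ih => rw [List.cons_append, List.getLastD_cons, List.getLastD_cons, ih]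

lemma getLastD_mem_or (l : List Int) (d : Int) : l.getLastD d = d ∨ l.getLastD d ∈ l := by
  induction l generalizing d with
  | nil => left; rfl
  | cons a t ih =>
    rw [List.getLastD_cons]
    rcases ih a with h | h
    · right; rw [h]; exact List.mem_cons_self
    · right; exact List.mem_cons_of_mem _ h

lemma nearest_cons (p0 : List Int) (i left j : Int) (h : i < j) :
    nearest (i :: p0) left j = nearest p0 i j := by
  unfold nearest
  simp only [List.filter_cons, decide_eq_true h, if_true, List.getLastD_cons]

lemma nearest_of_forall_ge (p0 : List Int) (left j : Int) (h : ∀ x ∈ p0, ¬ x < j) :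
    nearest p0 left j = left := by
  unfold nearest
  rw [List.filter_eq_nil_iff.mpr (by intro x hx; simpa using h x hx)]
  rfl

lemma nearest_nonneg (p0 : List Int) (j : Int) (h : ∀ x ∈ p0, 0 ≤ x) : 0 ≤ nearest p0 0 j := by
  unfold nearest
  rcases getLastD_mem_or (p0.filter (fun i => decide (i < j))) 0 with he | hm
  · rw [he]
  · exact h _ (List.mem_filter.mp hm).1

lemma filter_eq_takeWhile (j : Int) :
    ∀ (p0 : List Int), p0.Pairwise (· < ·) →
    p0.filter (fun i => decide (i < j)) = p0.takeWhile (fun i => decide (i < j)) := by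
  intro p0 h
  induction p0 with
  | nil => rfl
  | cons i rest ih =>
    rcases List.pairwise_cons.mp h with ⟨hlt, hrest⟩
    by_cases hij : i < j
    · simp only [List.filter_cons, List.takeWhile_cons, decide_eq_true hij, if_true, ih hrest]
    · simp only [List.filter_cons, List.takeWhile_cons, decide_eq_false hij, Bool.false_eq_true,
        if_false]
      rw [List.filter_eq_nil_iff.mpr]
      intro x hx
      simp only [decide_eq_true_eq]
      exact fun hxj => hij (lt_trans (hlt x hx) hxj)

lemma advanceB_eq (j : Int) : ∀ (p0 : List Int) (left : Int),
    advanceB p0 left j =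
      (p0.dropWhile (fun i => decide (i < j)),
       (p0.takeWhile (fun i => decide (i < j))).getLastD left) := by
  intro p0
  induction p0 with
  | nil => intro left; rfl
  | cons i rest ih =>
    intro left
    by_cases hij : i < j
    · simp only [advanceB, if_pos hij, List.dropWhile_cons, List.takeWhile_cons,
        decide_eq_true hij, if_true, ih, List.getLastD_cons]
    · simp only [advanceB, if_neg hij, List.dropWhile_cons, List.takeWhile_cons,
        decide_eq_false hij, Bool.false_eq_true, if_false, List.getLastD_nil]

lemma nearest_congr_of_lt (p0 : List Int) (left j j' : Int)
    (hsort : p0.Pairwise (· < ·)) (hjj : j < j') :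
    nearest p0 left j' =
      nearest (p0.dropWhile (fun i => decide (i < j))) (nearest p0 left j) j' := by
  have h1 : (p0.takeWhile (fun i => decide (i < j))).filter (fun i => decide (i < j')) =
      p0.takeWhile (fun i => decide (i < j)) := by
    apply List.filter_eq_self.mpr
    intro x hx
    have hxj := List.mem_takeWhile_imp hx
    simp only [decide_eq_true_eq] at hxj ⊢
    omega
  unfold nearest
  conv_lhs => rw [show p0 = p0.takeWhile (fun i => decide (i < j)) ++ p0.dropWhile (fun i => decide (i < j)) from (List.takeWhile_append_dropWhile).symm, List.filter_append, h1, getLastD_append]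
  rw [filter_eq_takeWhile j p0 hsort]

lemma loopB_eq : ∀ (js p0 : List Int) (left best : Int),
    p0.Pairwise (· < ·) → js.Pairwise (· < ·) →
    loopB js p0 left best =
      js.foldl (fun b j => min b (j - nearest p0 left j + 1)) best := by
  intro js
  induction js with
  | nil => intros; rfl
  | cons j js ih =>
    intro p0 left best h0 h1
    rcases List.pairwise_cons.mp h1 with ⟨hlt, hjs⟩
    simp only [loopB, advanceB_eq, List.foldl_cons]
    have hnear : (p0.takeWhile (fun i => decide (i < j))).getLastD left = nearest p0 left j := by
      unfold nearest; rw [filter_eq_takeWhile j p0 h0]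
    rw [hnear]
    rw [ih _ _ _ (List.Pairwise.sublist (List.dropWhile_sublist _) h0) hjs]
    apply PySem.List.foldl_congr_mem
    intro acc x hx
    rw [← nearest_congr_of_lt p0 left j x h0 (hlt x hx)]

lemma refGo_eq_wgo (c0 cl : Char) (n : Int) :
    ∀ (E : List (Int × Char)) (ans left : Int),
    refGo c0 cl n E ans left = n - wgo c0 cl E left (n - ans) := by
  intro E
  induction E with
  | nil => intro ans left; simp [refGo, wgo]
  | cons p rest ih =>
    intro ans left
    obtain ⟨i, c⟩ := p
    simp only [refGo, wgo]
    by_cases hc : c = cl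
    · simp only [hc, if_true]
      rw [ih]
      congr 1
      congr 1
      omega
    · simp only [hc, if_false]
      exact ih ans _

lemma foldA_eq (c0 cl : Char) (n : Int) (hne : c0 ≠ cl) :
    ∀ (E : List (Int × Char)) (ans left right : Int),
    E.Pairwise (fun p q => p.1 < q.1) →
    (∀ p ∈ E, left < p.1 ∧ right < p.1) →
    (right ≤ left ∨ n - (right - left + 1) ≤ ans) →
    (E.foldl (stepA c0 cl n) (ans, left, right)).1 = refGo c0 cl n E ans left := by
  intro E
  induction E with
  | nil => intros; rfl
  | cons p rest ih =>
    intro ans left right hpw hgt hinv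
    obtain ⟨i, c⟩ := p
    rcases List.pairwise_cons.mp hpw with ⟨hlt, hrest⟩
    obtain ⟨hli, hri⟩ := hgt (i, c) List.mem_cons_self
    simp only at hli hri
    simp only [List.foldl_cons, stepA, refGo]
    by_cases hc0 : c = c0
    · subst hc0
      simp only [if_true, if_neg hne]
      rw [if_neg (show ¬ (i : Int) < right by omega)]
      apply ih _ _ _ hrest
      · intro q hq
        have h1 := List.rel_of_pairwise_cons hpw hq
        exact ⟨h1, by omega⟩
      · left; omega
    · by_cases hcl : c = cl
      · subst hcl
        simp only [if_neg hc0, if_true]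
        rw [if_pos (show left < (i : Int) by omega)]
        apply ih _ _ _ hrest
        · intro q hq
          have h1 := List.rel_of_pairwise_cons hpw hq
          exact ⟨by omega, h1⟩
        · right; exact le_max_right _ _
      · simp only [if_neg hc0, if_neg hcl]
        have hans : (if left < right then max ans (n - (right - left + 1)) else ans) = ans := by
          rcases hinv with h | h
          · rw [if_neg (by omega)]
          · split_ifs with hc
            · omega
            · rfl
        rw [hans]
        apply ih _ _ _ hrest
        · intro q hq
          have h1 := List.rel_of_pairwise_cons hpw hq
          exact ⟨by omega, by omega⟩
        · exact hinv

lemma wgo_eq_fold (c0 cl : Char) (hne : c0 ≠ cl) :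
    ∀ (E : List (Int × Char)) (left b : Int),
    E.Pairwise (fun p q => p.1 < q.1) →
    wgo c0 cl E left b =
      ((E.filter (fun p => p.2 == cl)).map (·.1)).foldl
        (fun b j => min b (j - nearest ((E.filter (fun p => p.2 == c0)).map (·.1)) left j + 1)) b := by
  intro E
  induction E with
  | nil => intros; rfl
  | cons p rest ih =>
    intro left b hpw
    obtain ⟨i, c⟩ := p
    rcases List.pairwise_cons.mp hpw with ⟨hlt, hrest⟩
    have hmem : ∀ j ∈ (rest.filter (fun p => p.2 == cl)).map (fun p => p.1), i < j := by
      intro j hj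
      rcases List.mem_map.mp hj with ⟨q, hq, rfl⟩
      exact hlt q (List.mem_filter.mp hq).1
    by_cases hc0 : c = c0
    · subst hc0
      simp only [wgo, List.filter_cons, beq_self_eq_true, beq_eq_false_iff_ne.mpr hne,
        Bool.false_eq_true, if_true, if_false, if_neg hne, List.map_cons]
      rw [ih i b hrest]
      apply PySem.List.foldl_congr_mem
      intro acc j hj
      rw [nearest_cons _ i left j (hmem j hj)]
    · by_cases hcl : c = cl
      · subst hcl
        simp only [wgo, List.filter_cons, beq_self_eq_true, beq_eq_false_iff_ne.mpr hc0,
          Bool.false_eq_true, if_true, if_false, if_neg hc0, List.map_cons, List.foldl_cons]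
        rw [nearest_of_forall_ge _ left i (by
          intro x hx
          rcases List.mem_map.mp hx with ⟨q, hq, rfl⟩
          have := hlt q (List.mem_filter.mp hq).1
          omega)]
        exact ih left _ hrest
      · simp only [wgo, List.filter_cons, beq_eq_false_iff_ne.mpr hcl, beq_eq_false_iff_ne.mpr hc0,
          Bool.false_eq_true, if_false, if_neg hc0, if_neg hcl]
        exact ih left b hrest

lemma foldl_min_init (L : List Int) (n : Int) (h : ∃ x ∈ L, x ≤ n) :
    L.foldl min n = L.foldl min (n + 1) := by
  obtain ⟨x, hxL, hxn⟩ := h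
  cases L with
  | nil => simp at hxL
  | cons a t =>
    have core_le : t.foldl min a ≤ n := by
      rcases List.mem_cons.mp hxL with rfl | hx
      · exact le_trans (PySem.List.foldl_min_le t x).1 hxn
      · exact le_trans ((PySem.List.foldl_min_le t a).2 x hx) hxn
    rw [List.foldl_cons, List.foldl_cons, List.foldl_assoc, List.foldl_assoc,
      min_eq_right core_le, min_eq_right (by omega)]

-- ===== VERDICT (by name: the statement is the Claim_ definition above) =====
theorem optimizeIdentifiers_spec : Claim_equal_optimizeIdentifiers := by
  intro s _ hpre
  unfold Spec_optimizeIdentifiers optimizeIdentifiers optimizeIdentifiers_alt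
  have hnil : s.toList ≠ [] := fun hc => hpre (String.toList_inj.mp (by simp [hc]))
  obtain ⟨c0, cs', hcs⟩ : ∃ c0 cs', s.toList = c0 :: cs' := by
    cases h : s.toList with
    | nil => exact absurd h hnil
    | cons a l => exact ⟨a, l, rfl⟩
  have hglast : (c0 :: cs').getLast? = some ((c0 :: cs').getLast (List.cons_ne_nil c0 cs')) :=
    List.getLast?_eq_some_getLast _
  simp only [hcs, PySem.List.pyGet?_zero_cons, PySem.List.pyGet?_neg_one, hglast]
  set cl := (c0 :: cs').getLast (List.cons_ne_nil c0 cs') with hcl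
  by_cases hcc : c0 = cl
  · simp [hcc]
  · simp only [if_neg hcc]
    set n : Int := ((c0 :: cs').length : Int) with hn
    set E' := PySem.List.enumerate cs' 1 with hE'
    have hEpw : E'.Pairwise (fun p q => p.1 < q.1) := PySem.List.pairwise_lt_enumerate cs' 1
    have hEpos : ∀ p ∈ E', 0 < p.1 := by
      intro p hp
      rcases (PySem.List.mem_enumerate_iff cs' 1 p).mp hp with ⟨k, hk, rfl⟩
      simp only
      omega
    set p0' := ((E'.filter (fun p => p.2 == c0)).map (fun p => p.1)) with hp0'
    set p1' := ((E'.filter (fun p => p.2 == cl)).map (fun p => p.1)) with hp1'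
    have hp0pos : ∀ x ∈ p0', 0 < x := by
      intro x hx
      rcases List.mem_map.mp hx with ⟨q, hq, rfl⟩
      exact hEpos q (List.mem_filter.mp hq).1
    have hp1pos : ∀ x ∈ p1', 0 < x := by
      intro x hx
      rcases List.mem_map.mp hx with ⟨q, hq, rfl⟩
      exact hEpos q (List.mem_filter.mp hq).1
    have hp0pw : p0'.Pairwise (· < ·) :=
      List.pairwise_map.mpr (List.Pairwise.sublist List.filter_sublist hEpw)
    have hp1pw : p1'.Pairwise (· < ·) :=
      List.pairwise_map.mpr (List.Pairwise.sublist List.filter_sublist hEpw)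
    -- A side
    have hA : ((PySem.List.enumerate (c0 :: cs') 0).foldl (stepA c0 cl n) (0, 0, 0)).1
        = n - (p1'.foldl (fun b j => min b (j - nearest p0' 0 j + 1)) n) := by
      rw [PySem.List.enumerate_cons, List.foldl_cons]
      have hstep1 : stepA c0 cl n (0, 0, 0) (0, c0) = (0, 0, 0) := by
        simp [stepA, hcc]
      rw [hstep1, show (0 : Int) + 1 = 1 from rfl, ← hE']
      rw [foldA_eq c0 cl n hcc E' 0 0 0 hEpw
        (fun p hp => ⟨hEpos p hp, hEpos p hp⟩) (Or.inl le_rfl)]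
      rw [refGo_eq_wgo, sub_zero]
      rw [wgo_eq_fold c0 cl hcc E' 0 n hEpw]
    -- B side
    have hB : (n - loopB (((PySem.List.enumerate (c0 :: cs') 0).filter (fun p => p.2 == cl)).map (fun p => p.1))
          (((PySem.List.enumerate (c0 :: cs') 0).filter (fun p => p.2 == c0)).map (fun p => p.1)) 0 (n + 1))
        = n - (p1'.foldl (fun b j => min b (j - nearest p0' 0 j + 1)) (n + 1)) := by
      rw [PySem.List.enumerate_cons, show (0 : Int) + 1 = 1 from rfl, ← hE']
      simp only [List.filter_cons, beq_self_eq_true, beq_eq_false_iff_ne.mpr hcc,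
        Bool.false_eq_true, if_true, if_false, List.map_cons, ← hp0', ← hp1']
      rw [loopB_eq p1' (0 :: p0') 0 (n + 1)
        (List.pairwise_cons.mpr ⟨hp0pos, hp0pw⟩) hp1pw]
      congr 1
      apply PySem.List.foldl_congr_mem
      intro acc j hj
      rw [nearest_cons p0' 0 0 j (hp1pos j hj)]
    rw [hA, hB]
    -- the two inits n and n+1 give the same minimum: p1' has a window of size ≤ n
    congr 1
    rw [← List.foldl_map (f := fun j => j - nearest p0' 0 j + 1) (g := fun b x => min b x),
        ← List.foldl_map (f := fun j => j - nearest p0' 0 j + 1) (g := fun b x => min b x)]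
    apply foldl_min_init
    -- witness: the last character of cs is cl, at index (cs'.length : Int)
    have hcs'ne : cs' ≠ [] := by
      intro hc
      subst hc
      exact hcc (by simpa using hcl)
    have hlast : cs'.getLast hcs'ne = cl := by
      rw [hcl, List.getLast_cons hcs'ne]
    have hklen : cs'.length - 1 < cs'.length :=
      Nat.sub_lt (List.length_pos_of_ne_nil hcs'ne) one_pos
    have hkval : cs'[cs'.length - 1] = cl := by
      rw [List.getLast_eq_getElem] at hlast
      exact hlast
    refine ⟨((cs'.length : Int)) - nearest p0' 0 (cs'.length : Int) + 1, ?_, ?_⟩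
    · apply List.mem_map.mpr
      refine ⟨(cs'.length : Int), ?_, rfl⟩
      apply List.mem_map.mpr
      refine ⟨((cs'.length : Int), cl), ?_, rfl⟩
      apply List.mem_filter.mpr
      refine ⟨?_, beq_self_eq_true cl⟩
      apply (PySem.List.mem_enumerate_iff cs' 1 _).mpr
      refine ⟨cs'.length - 1, hklen, ?_⟩
      rw [hkval]
      have : (1 : Int) + ((cs'.length - 1 : Nat) : Int) = (cs'.length : Int) := by
        have := List.length_pos_of_ne_nil hcs'ne
        omega
      rw [this]
    · have hnn : 0 ≤ nearest p0' 0 (cs'.length : Int) :=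
        nearest_nonneg p0' _ (fun x hx => le_of_lt (hp0pos x hx))
      have : n = (cs'.length : Int) + 1 := by simp [hn]
      omega
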